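-- pv_equiv track=rewrite | github.com/lord483/Project-Euler-Solutions | src/051-100/P085.py | num_of_rects
-- ===== SOURCE A (Python) =====
-- def num_of_rects(n, m):
--     res = 0
--     for x in range(1, n + 1):
--         nx = n + 1 - x
--         for y in range(1, m + 1):
--             ny = m + 1 - y
--             res += (x * y)
--
--     return res
-- ===== SOURCE B (Python) =====
-- def num_of_rects(n, m):
--     tn = max(n, 0)
--     tm = max(m, 0)
--     return (tn * (tn + 1) // 2) * (tm * (tm + 1) // 2)
-- ===== Notes on version B (the rewrite author's own statement) =====
-- stated objective: faster
-- what changed: Replaced the nested O(n*m) summation loops with the closed form T(n)*T(m) where T(k)=max(k,0)*(max(k,0)+1)//2.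
import Mathlib
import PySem

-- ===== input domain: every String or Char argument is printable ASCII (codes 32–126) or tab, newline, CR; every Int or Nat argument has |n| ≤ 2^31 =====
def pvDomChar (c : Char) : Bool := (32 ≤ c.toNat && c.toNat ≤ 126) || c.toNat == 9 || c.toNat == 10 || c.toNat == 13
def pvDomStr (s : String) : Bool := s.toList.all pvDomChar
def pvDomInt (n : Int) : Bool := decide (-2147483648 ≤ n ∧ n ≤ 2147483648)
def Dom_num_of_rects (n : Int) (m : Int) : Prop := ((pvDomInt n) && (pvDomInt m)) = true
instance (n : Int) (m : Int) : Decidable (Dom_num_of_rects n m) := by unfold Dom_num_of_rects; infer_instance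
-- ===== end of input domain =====

-- B replaces A's nested summation loops with the closed form T(n)*T(m), T(k)=max(k,0)*(max(k,0)+1)//2 (faster: O(1) vs O(n*m)).


-- ===== PORT A =====
def num_of_rects (n : Int) (m : Int) : Int :=
  (PySem.List.pyRange 1 (n + 1) 1).foldl (fun res x =>
    let _nx := n + 1 - x
    (PySem.List.pyRange 1 (m + 1) 1).foldl (fun r y =>
      let _ny := m + 1 - y
      r + x * y) res) 0

-- ===== PORT B =====
def num_of_rects_alt (n : Int) (m : Int) : Int :=
  let tn := max n 0
  let tm := max m 0
  (PySem.Int.floordiv (tn * (tn + 1)) 2) * (PySem.Int.floordiv (tm * (tm + 1)) 2)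

-- ===== PRECONDITION & SPEC =====
def Spec_num_of_rects (n : Int) (m : Int) (out : Int) : Prop := out = num_of_rects_alt n m
instance (n : Int) (m : Int) (out : Int) : Decidable (Spec_num_of_rects n m out) := by unfold Spec_num_of_rects; infer_instance

-- ===== CLAIM (what is proved, stated in full; the proofs are below) =====
def Claim_equal_num_of_rects : Prop := ∀ (n : Int) (m : Int), Dom_num_of_rects n m → Spec_num_of_rects n m (num_of_rects n m)

-- ===== LEMMAS AND PROOFS =====

-- sum_{y=1..k} c*y, started from r, equals r + c * T(k) with T(k) = max(k,0)(max(k,0)+1)/2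
theorem pv_inner_sum_nat (c r : Int) (t : Nat) :
    (PySem.List.pyRange 1 ((t : Int) + 1) 1).foldl (fun a y => a + c * y) r
      = r + c * ((t * (t + 1) / 2 : Nat) : Int) := by
  induction t generalizing r with
  | zero => simp [PySem.List.pyRange_one_eq_nil]
  | succ k ih =>
    have hcast : ((k + 1 : Nat) : Int) = (k : Int) + 1 := by push_cast; ring
    rw [hcast]
    have hsplit : PySem.List.pyRange 1 (((k : Int) + 1) + 1) 1
        = PySem.List.pyRange 1 ((k : Int) + 1) 1 ++ [(k : Int) + 1] := by
      have := PySem.List.pyRange_one_succ_right (a := 1) (b := (k : Int) + 1) (by omega)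
      simpa using this
    rw [hsplit, List.foldl_append, ih]
    simp only [List.foldl_cons, List.foldl_nil]
    have hc : (((k + 1) * (k + 1 + 1) / 2 : Nat) : Int)
        = ((k * (k + 1) / 2 : Nat) : Int) + ((k : Int) + 1) := by
      have h2 : (k + 1) * (k + 1 + 1) = k * (k + 1) + 2 * (k + 1) := by ring
      have h3 : (k + 1) * (k + 1 + 1) / 2 = k * (k + 1) / 2 + (k + 1) := by omega
      rw [h3]; push_cast; ring
    rw [hc]; ring

theorem pv_inner_sum (c r k : Int) :
    (PySem.List.pyRange 1 (k + 1) 1).foldl (fun a y => a + c * y) r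
      = r + c * PySem.Int.floordiv (max k 0 * (max k 0 + 1)) 2 := by
  by_cases hk : k ≤ 0
  · have hmax : max k 0 = 0 := by omega
    rw [PySem.List.pyRange_one_eq_nil (by omega), hmax]
    simp [PySem.Int.floordiv]
  · obtain ⟨t, ht⟩ : ∃ t : Nat, k = (t : Int) := ⟨k.toNat, by omega⟩
    subst ht
    rw [pv_inner_sum_nat]
    have hmax : max (t : Int) 0 = (t : Int) := by omega
    rw [hmax, PySem.Int.floordiv_eq_ediv_of_pos (by omega)]
    have h2 : ((t * (t + 1) : Nat) : Int) = (t : Int) * ((t : Int) + 1) := by push_cast; ring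
    have h3 : ((t * (t + 1) / 2 : Nat) : Int) = ((t * (t + 1) : Nat) : Int) / 2 := by omega
    rw [h3, h2]

-- ===== VERDICT (by name: the statement is the Claim_ definition above) =====
theorem num_of_rects_spec : Claim_equal_num_of_rects := by
  intro n m _
  unfold Spec_num_of_rects num_of_rects num_of_rects_alt
  simp only []
  have hinner : ∀ (res x : Int),
      (PySem.List.pyRange 1 (m + 1) 1).foldl (fun r y => r + x * y) res
        = res + (PySem.Int.floordiv (max m 0 * (max m 0 + 1)) 2) * x := by
    intro res x
    rw [pv_inner_sum x res m]; ring
  calc (PySem.List.pyRange 1 (n + 1) 1).foldl (fun res x =>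
          (PySem.List.pyRange 1 (m + 1) 1).foldl (fun r y => r + x * y) res) 0
      = (PySem.List.pyRange 1 (n + 1) 1).foldl (fun res x =>
          res + (PySem.Int.floordiv (max m 0 * (max m 0 + 1)) 2) * x) 0 := by
        apply PySem.List.foldl_congr_mem
        intro a x _
        exact hinner a x
    _ = 0 + (PySem.Int.floordiv (max m 0 * (max m 0 + 1)) 2)
          * PySem.Int.floordiv (max n 0 * (max n 0 + 1)) 2 := pv_inner_sum _ 0 n
    _ = _ := by ring
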